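-- pv_equiv track=rewrite | github.com/tim-chaplin/fab_tcg_deck_optimizer | scripts/update_id_and_registry.py | build_ordered_ids
-- ===== SOURCE A (Python) =====
-- def family(n):
--     for suf in ("Blue", "Yellow", "Red"):
--         if n.endswith(suf):
--             return n[: -len(suf)]
--     return n
--
-- def color(n):
--     for suf in ("Red", "Yellow", "Blue"):
--         if n.endswith(suf):
--             return suf
--     return ""
--
-- COLOR_ORDER = {"Red": 0, "Yellow": 1, "Blue": 2, "": 3}
--
-- def build_ordered_ids(existing, new_ids):
--     all_ids = existing + new_ids
--     fam_map = {}
--     for i in all_ids: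
--         fam_map.setdefault(family(i), []).append(i)
--     ordered = []
--     for fam in sorted(fam_map):
--         within = sorted(fam_map[fam], key=lambda n: COLOR_ORDER[color(n)])
--         ordered.append(within)
--     return ordered
-- ===== SOURCE B (Python) =====
-- from itertools import groupby
--
-- _SUFFIXES = ("Red", "Yellow", "Blue")
--
-- def _key(n):
--     for rank, suf in enumerate(_SUFFIXES):
--         if n.endswith(suf):
--             return n[: -len(suf)], rank
--     return n, 3
--
-- def build_ordered_ids(existing, new_ids):
--     ids = sorted(existing + new_ids, key=_key)
--     return [list(g) for _, g in groupby(ids, key=lambda n: _key(n)[0])]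
-- ===== Notes on version B (the rewrite author's own statement) =====
-- stated objective: idiomatic
-- what changed: Replaces the dict-of-buckets grouping plus one sort per family with a single stable sort of all ids by the composite key (family, color rank) followed by a linear itertools.groupby pass; the two suffix helpers and the color-order dict collapse into one enumerate scan computing the key pair.
import Mathlib
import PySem

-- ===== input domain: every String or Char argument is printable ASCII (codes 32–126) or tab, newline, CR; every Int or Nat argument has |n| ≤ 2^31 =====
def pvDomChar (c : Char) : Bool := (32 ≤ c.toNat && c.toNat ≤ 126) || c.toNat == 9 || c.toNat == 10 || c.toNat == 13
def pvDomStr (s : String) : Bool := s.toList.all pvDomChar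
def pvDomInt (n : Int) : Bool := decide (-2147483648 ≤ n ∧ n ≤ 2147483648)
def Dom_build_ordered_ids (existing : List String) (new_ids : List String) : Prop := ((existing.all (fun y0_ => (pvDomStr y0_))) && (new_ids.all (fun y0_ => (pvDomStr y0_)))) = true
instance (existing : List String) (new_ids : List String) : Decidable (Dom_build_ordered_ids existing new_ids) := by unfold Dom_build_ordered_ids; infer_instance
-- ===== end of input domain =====

-- B replaces the dict-of-buckets grouping plus one sort per family by a single stable
-- sort on the composite key (family, color rank) followed by a linear groupby pass (idiomatic).


-- ===== PORT A =====
-- family(n): the loop over the constant tuple ("Blue", "Yellow", "Red") unrolled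
def pyFamily (n : String) : String :=
  if PySem.Str.endswith n "Blue" then PySem.Str.slice n none (some (-4))
  else if PySem.Str.endswith n "Yellow" then PySem.Str.slice n none (some (-6))
  else if PySem.Str.endswith n "Red" then PySem.Str.slice n none (some (-3))
  else n

-- color(n): the loop over ("Red", "Yellow", "Blue") unrolled
def pyColor (n : String) : String :=
  if PySem.Str.endswith n "Red" then "Red"
  else if PySem.Str.endswith n "Yellow" then "Yellow"
  else if PySem.Str.endswith n "Blue" then "Blue"
  else ""

def COLOR_ORDER : PySem.Dict String Int :=
  PySem.Dict.ofList [("Red", 0), ("Yellow", 1), ("Blue", 2), ("", 3)]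

-- COLOR_ORDER[color(n)]: pyColor always returns one of the four keys, so the default is never used
def colorOrderA (n : String) : Int := COLOR_ORDER.getD (pyColor n) 0

def build_ordered_ids (existing : List String) (new_ids : List String) : List (List String) :=
  let all_ids := existing ++ new_ids
  -- fam_map.setdefault(family(i), []).append(i)  ≡  fam_map[family(i)] = fam_map.get(family(i), []) + [i]
  let fam_map := all_ids.foldl (fun d i => d.modify (pyFamily i) [] (fun l => l ++ [i])) PySem.Dict.empty
  (PySem.List.sorted fam_map.keys (fun x => x)).foldl
    (fun ordered fam => ordered ++ [PySem.List.sorted (fam_map.getD fam []) colorOrderA]) []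

-- ===== PORT B =====
-- _key(n) from Source B: one scan over ("Red", "Yellow", "Blue") with its rank, unrolled
def pyKey (n : String) : String × Int :=
  if PySem.Str.endswith n "Red" then (PySem.Str.slice n none (some (-3)), 0)
  else if PySem.Str.endswith n "Yellow" then (PySem.Str.slice n none (some (-6)), 1)
  else if PySem.Str.endswith n "Blue" then (PySem.Str.slice n none (some (-4)), 2)
  else (n, 3)

-- hand port of [list(g) for _, g in itertools.groupby(ids, key=…)] (PySem has no groupby):
-- maximal runs of consecutive elements with equal (under String ==, an equivalence) keys
def pyGroupBy (key : String → String) : List String → List (List String)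
  | [] => []
  | x :: xs =>
    match pyGroupBy key xs with
    | [] => [[x]]
    | g :: gs => if key x == key (g.headD x) then (x :: g) :: gs else [x] :: g :: gs

def build_ordered_ids_alt (existing : List String) (new_ids : List String) : List (List String) :=
  let ids := PySem.List.sorted2 (existing ++ new_ids) (fun n => (pyKey n).1) (fun n => (pyKey n).2)
  pyGroupBy (fun n => (pyKey n).1) ids

-- ===== PRECONDITION & SPEC =====
def Spec_build_ordered_ids (existing : List String) (new_ids : List String) (out : List (List String)) : Prop := out = build_ordered_ids_alt existing new_ids
instance (existing : List String) (new_ids : List String) (out : List (List String)) : Decidable (Spec_build_ordered_ids existing new_ids out) := by unfold Spec_build_ordered_ids; infer_instance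

-- ===== CLAIM (what is proved, stated in full; the proofs are below) =====
def Claim_equal_build_ordered_ids : Prop := ∀ (existing : List String) (new_ids : List String), Dom_build_ordered_ids existing new_ids → Spec_build_ordered_ids existing new_ids (build_ordered_ids existing new_ids)

-- ===== LEMMAS AND PROOFS =====

lemma endswith_excl (n : String) (p q : String) (hp : PySem.Str.endswith n p = true)
    (hpq : ¬ p.toList <:+ q.toList) (hqp : ¬ q.toList <:+ p.toList) :
    PySem.Str.endswith n q = false := by
  simp only [PySem.Str.endswith, PySem.Chars.endswith, List.isSuffixOf_iff_suffix] at *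
  by_contra h
  simp only [Bool.not_eq_false, List.isSuffixOf_iff_suffix] at h
  rcases List.suffix_or_suffix_of_suffix h hp with h' | h'
  · exact hqp h'
  · exact hpq h'

lemma insertBy_append_left {b : String → String → Bool} {x : String} {B C : List String}
    (h : ∀ y ∈ B, b x y = false) :
    PySem.List.insertBy b x (B ++ C) = B ++ PySem.List.insertBy b x C := by
  induction B with
  | nil => simp
  | cons y B ih =>
    have hy := h y (by simp)
    simp only [List.cons_append, PySem.List.insertBy, hy, Bool.false_eq_true, if_false]
    rw [ih (fun z hz => h z (by simp [hz]))]

lemma insertBy_append_right {b : String → String → Bool} {x : String} {B C : List String}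
    (h : ∀ z, C.head? = some z → b x z = true) :
    PySem.List.insertBy b x (B ++ C) = PySem.List.insertBy b x B ++ C := by
  induction B with
  | nil =>
    cases C with
    | nil => simp
    | cons z C' => simp [PySem.List.insertBy, h z rfl]
  | cons y B ih =>
    by_cases hy : b x y = true
    · simp [PySem.List.insertBy, hy]
    · simp only [Bool.not_eq_true] at hy
      simp only [List.cons_append, PySem.List.insertBy, hy, Bool.false_eq_true, if_false]
      rw [ih]

lemma insertBy_congr {b b' : String → String → Bool} {x : String} {B : List String}
    (h : ∀ y ∈ B, b x y = b' x y) :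
    PySem.List.insertBy b x B = PySem.List.insertBy b' x B := by
  induction B with
  | nil => rfl
  | cons y B ih =>
    have hy := h y (by simp)
    simp only [PySem.List.insertBy, hy]
    rw [ih (fun z hz => h z (by simp [hz]))]

lemma pyKey_eq (n : String) : pyKey n = (pyFamily n, colorOrderA n) := by
  have c0 : COLOR_ORDER.getD "Red" 0 = 0 := by decide
  have c1 : COLOR_ORDER.getD "Yellow" 0 = 1 := by decide
  have c2 : COLOR_ORDER.getD "Blue" 0 = 2 := by decide
  have c3 : COLOR_ORDER.getD "" 0 = 3 := by decide
  unfold pyKey pyFamily colorOrderA pyColor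
  by_cases hr : PySem.Str.endswith n "Red" = true
  · have hb := endswith_excl n "Red" "Blue" hr (by decide) (by decide)
    have hy := endswith_excl n "Red" "Yellow" hr (by decide) (by decide)
    simp at hr hb hy
    simp [hr, hb, hy, c0]
  · simp only [Bool.not_eq_true] at hr
    by_cases hy : PySem.Str.endswith n "Yellow" = true
    · have hb := endswith_excl n "Yellow" "Blue" hy (by decide) (by decide)
      simp at hr hb hy
      simp [hr, hb, hy, c1]
    · simp only [Bool.not_eq_true] at hy
      by_cases hb : PySem.Str.endswith n "Blue" = true
      · simp at hr hb hy
        simp [hr, hb, hy, c2]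
      · simp only [Bool.not_eq_true] at hb
        simp at hr hb hy
        simp [hr, hb, hy, c3]

lemma fam_map_getD (xs : List String) (c : String) :
    (xs.foldl (fun d i => d.modify (pyFamily i) [] (fun l => l ++ [i])) PySem.Dict.empty).getD c []
      = xs.filter (fun i => pyFamily i == c) := by
  have h : xs.foldl (fun d i => d.modify (pyFamily i) [] (fun l => l ++ [i])) PySem.Dict.empty
      = (xs.map (fun i => (pyFamily i, i))).foldl (fun d p => d.modify p.1 [] (fun l => l ++ [p.2])) PySem.Dict.empty := by
    rw [List.foldl_map]
  rw [h, PySem.Dict.getD_foldl_modify_append]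
  rw [List.filter_map]
  simp [Function.comp_def]

lemma fam_map_keys (xs : List String) :
    (xs.foldl (fun d i => d.modify (pyFamily i) [] (fun l => l ++ [i])) PySem.Dict.empty).keys
      = PySem.Set.ofList (xs.map pyFamily) := by
  have h := PySem.Dict.keys_foldl_modify_key xs pyFamily ([] : List String)
    (fun _ i => (fun l => l ++ [i])) PySem.Dict.empty
  simpa [PySem.Set.ofList, PySem.Set.update, PySem.Dict.keys_empty] using h

lemma pyGroupBy_head (key : String → String) (L : List String) (g : List String)
    (gs : List (List String)) (h : pyGroupBy key L = g :: gs) : L.head? = g.head? ∧ g ≠ [] := by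
  cases L with
  | nil => simp [pyGroupBy] at h
  | cons x xs =>
    simp only [pyGroupBy] at h
    split at h
    · cases h; simp
    · split at h <;> (cases h; simp)

lemma pyGroupBy_run (key : String → String) (f : String) (B L : List String)
    (hB : B ≠ []) (hkey : ∀ y ∈ B, key y = f)
    (hL : ∀ z, L.head? = some z → key z ≠ f) :
    pyGroupBy key (B ++ L) = B :: pyGroupBy key L := by
  induction B with
  | nil => exact absurd rfl hB
  | cons b B ih =>
    cases B with
    | nil =>
      simp only [List.cons_append, List.nil_append, pyGroupBy]
      cases hGL : pyGroupBy key L with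
      | nil =>
        rfl
      | cons g gs =>
        obtain ⟨hhead, hgne⟩ := pyGroupBy_head key L g gs hGL
        obtain ⟨z, hz⟩ := List.exists_mem_of_ne_nil g hgne
        have hz' : g.head? = some (g.headD b) := by
          cases g with
          | nil => exact absurd rfl hgne
          | cons a t => simp
        have hkz : key (g.headD b) ≠ f := hL _ (by rw [hhead]; exact hz')
        have hne2 : ¬ key b = key (g.head?.getD b) := by
          intro hc
          exact hkz (by rw [List.headD_eq_head?_getD, ← hc, hkey b (by simp)])
        simp [hne2]
    | cons b' B' =>
      have ihh := ih (by simp) (fun y hy => hkey y (List.mem_cons_of_mem _ hy))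
      have hstep : pyGroupBy key (b :: (b' :: B' ++ L)) =
          match pyGroupBy key (b' :: B' ++ L) with
          | [] => [[b]]
          | g :: gs => if key b == key (g.headD b) then (b :: g) :: gs else [b] :: g :: gs := rfl
      rw [List.cons_append, hstep, ihh]
      have h1 : key b = f := hkey b (by simp)
      have h2 : key b' = f := hkey b' (by simp)
      simp [h1, h2]

lemma pyGroupBy_blocks (fams : List String) (G : String → List String)
    (hsort : fams.Pairwise (· < ·))
    (hmem : ∀ f ∈ fams, ∀ y ∈ G f, pyFamily y = f)
    (hne : ∀ f ∈ fams, G f ≠ []) :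
    pyGroupBy pyFamily (fams.flatMap G) = fams.map G := by
  induction fams with
  | nil => rfl
  | cons f rest ih =>
    have hrest := ih (List.Pairwise.of_cons hsort)
      (fun f' hf' => hmem f' (by simp [hf'])) (fun f' hf' => hne f' (by simp [hf']))
    have hL : ∀ z, (rest.flatMap G).head? = some z → pyFamily z ≠ f := by
      intro z hz
      have hz' : z ∈ rest.flatMap G := List.mem_of_mem_head? hz
      obtain ⟨f₂, hf₂, hzG⟩ := List.mem_flatMap.mp hz'
      have hfz : pyFamily z = f₂ := hmem f₂ (by simp [hf₂]) z hzG
      have hlt : f < f₂ := (List.pairwise_cons.mp hsort).1 f₂ hf₂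
      rw [hfz]; exact ne_of_gt hlt
    rw [List.flatMap_cons,
      pyGroupBy_run pyFamily f (G f) (rest.flatMap G) (hne f (by simp)) (hmem f (by simp)) hL,
      hrest, List.map_cons]

def bFam (a b : String) : Bool := decide (a < b)
def bCol (a b : String) : Bool := decide (colorOrderA a < colorOrderA b)
def bTup (a b : String) : Bool :=
  decide (pyFamily a < pyFamily b) || (!decide (pyFamily b < pyFamily a) && decide (colorOrderA a < colorOrderA b))

lemma insert_into_blocks (x : String) (fams : List String) (G : String → List String)
    (hsort : fams.Pairwise (· < ·))
    (hmem : ∀ f ∈ fams, ∀ y ∈ G f, pyFamily y = f)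
    (hne : ∀ f ∈ fams, G f ≠ [])
    (hout : pyFamily x ∉ fams → G (pyFamily x) = []) :
    PySem.List.insertBy bTup x (fams.flatMap G) =
      (if pyFamily x ∈ fams then fams else PySem.List.insertBy bFam (pyFamily x) fams).flatMap
        (fun f => if f = pyFamily x then PySem.List.insertBy bCol x (G f) else G f) := by
  have hcongr : ∀ (l : List String), (∀ f' ∈ l, f' ≠ pyFamily x) →
      l.flatMap (fun f => if f = pyFamily x then PySem.List.insertBy bCol x (G f) else G f)
        = l.flatMap G :=
    fun l hl => List.flatMap_congr (fun f' hf' => by rw [if_neg (hl f' hf')])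
  induction fams with
  | nil =>
    have h0 : G (pyFamily x) = [] := hout (by simp)
    simp [PySem.List.insertBy, h0]
  | cons f rest ih =>
    have hrest_lt : ∀ f' ∈ rest, f < f' := (List.pairwise_cons.mp hsort).1
    rcases lt_trichotomy (pyFamily x) f with hlt | heq | hgt
    · -- x's family precedes the first block: new singleton block in front
      have hnm : pyFamily x ∉ f :: rest := by
        intro hm
        rcases List.mem_cons.mp hm with h | h
        · exact absurd h (ne_of_lt hlt)
        · exact absurd rfl (ne_of_gt (lt_trans hlt (hrest_lt _ h)))
      have h0 : G (pyFamily x) = [] := hout hnm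
      rcases hGf : G f with _ | ⟨z, t⟩
      · exact absurd hGf (hne f (by simp))
      · have hz : pyFamily z = f := hmem f (by simp) z (by rw [hGf]; simp)
        have hbz : bTup x z = true := by
          simp only [bTup, hz, Bool.or_eq_true, decide_eq_true_eq]
          exact Or.inl hlt
        have hbf : bFam (pyFamily x) f = true := by simp [bFam, hlt]
        rw [if_neg hnm]
        simp only [List.flatMap_cons, hGf, List.cons_append, PySem.List.insertBy, hbz, if_true]
        simp only [hbf, if_true]
        rw [List.flatMap_cons, if_pos rfl, h0]
        rw [List.flatMap_cons, if_neg (Ne.symm (ne_of_lt hlt)), hGf]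
        rw [hcongr rest (fun f' hf' => Ne.symm (ne_of_lt (lt_trans hlt (hrest_lt f' hf'))))]
        simp [PySem.List.insertBy]
    · -- x joins the first block, ordered inside it by the color key alone
      have hm : pyFamily x ∈ f :: rest := by simp [heq]
      rw [if_pos hm]
      rw [List.flatMap_cons, List.flatMap_cons]
      have hhead : ∀ z, (rest.flatMap G).head? = some z → bTup x z = true := by
        intro z hz
        obtain ⟨f₂, hf₂, hzG⟩ := List.mem_flatMap.mp (List.mem_of_mem_head? hz)
        have hfz : pyFamily z = f₂ := hmem f₂ (by simp [hf₂]) z hzG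
        simp only [bTup, hfz, heq, Bool.or_eq_true, decide_eq_true_eq]
        exact Or.inl (hrest_lt _ hf₂)
      rw [insertBy_append_right hhead]
      rw [insertBy_congr (b' := bCol) (fun y hy => by
        have hfy : pyFamily y = f := hmem f (by simp) y hy
        simp [bTup, bCol, hfy, heq])]
      rw [if_pos heq.symm]
      rw [hcongr rest (fun f' hf' => by rw [heq]; exact Ne.symm (ne_of_lt (hrest_lt f' hf')))]
    · -- x's family comes after the first block: skip it and recurse
      have hfx : ∀ y ∈ G f, bTup x y = false := by
        intro y hy
        have hfy : pyFamily y = f := hmem f (by simp) y hy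
        simp [bTup, hfy, not_lt_of_gt hgt, hgt]
      rw [List.flatMap_cons, insertBy_append_left hfx]
      have ihh := ih (List.Pairwise.of_cons hsort)
        (fun f' hf' => hmem f' (by simp [hf'])) (fun f' hf' => hne f' (by simp [hf']))
        (fun hnm => hout (by
          intro hm
          rcases List.mem_cons.mp hm with h | h
          · exact absurd h.symm hgt.ne
          · exact hnm h))
      rw [ihh]
      by_cases hm : pyFamily x ∈ rest
      · rw [if_pos hm, if_pos (by simp [hm])]
        rw [List.flatMap_cons, if_neg hgt.ne]
      · rw [if_neg hm, if_neg (by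
          intro hmm
          rcases List.mem_cons.mp hmm with h | h
          · exact absurd h.symm hgt.ne
          · exact hm h)]
        have hbf : bFam (pyFamily x) f = false := by simp [bFam, not_lt_of_gt hgt]
        simp only [PySem.List.insertBy, hbf, Bool.false_eq_true, if_false]
        rw [List.flatMap_cons, if_neg hgt.ne]

lemma sorted2_foldl (xs : List String) :
    PySem.List.sorted2 xs pyFamily colorOrderA
      = xs.foldl (fun acc x => PySem.List.insertBy bTup x acc) [] := rfl

lemma sorted_foldl_col (xs : List String) :
    PySem.List.sorted xs colorOrderA
      = xs.foldl (fun acc x => PySem.List.insertBy bCol x acc) [] := rfl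

lemma sorted_foldl_id (xs : List String) :
    PySem.List.sorted xs (fun f => f)
      = xs.foldl (fun acc x => PySem.List.insertBy bFam x acc) [] := rfl

lemma ofList_append_singleton (l : List String) (a : String) :
    PySem.Set.ofList (l ++ [a]) = PySem.Set.add (PySem.Set.ofList l) a := by
  simp [PySem.Set.ofList, List.foldl_append]

lemma sorted2_eq_blocks (xs : List String) :
    PySem.List.sorted2 xs pyFamily colorOrderA =
      (PySem.List.sorted (PySem.Set.ofList (xs.map pyFamily)) (fun f => f)).flatMap
        (fun f => PySem.List.sorted (xs.filter (fun i => pyFamily i == f)) colorOrderA) := by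
  induction xs using List.reverseRecOn with
  | nil => rfl
  | append_singleton xs x ih =>
    have hL : PySem.List.sorted2 (xs ++ [x]) pyFamily colorOrderA
        = PySem.List.insertBy bTup x (PySem.List.sorted2 xs pyFamily colorOrderA) := by
      rw [sorted2_foldl, sorted2_foldl, List.foldl_append]; rfl
    set fams := PySem.List.sorted (PySem.Set.ofList (xs.map pyFamily)) (fun f => f) with hfams
    set G := fun f => PySem.List.sorted (xs.filter (fun i => pyFamily i == f)) colorOrderA with hG
    have hsort : fams.Pairwise (· < ·) := PySem.List.sorted_ofList_pairwise_lt _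
    have hmemfams : ∀ f, f ∈ fams ↔ f ∈ xs.map pyFamily := by
      intro f
      rw [hfams, PySem.List.mem_sorted, PySem.Set.mem_ofList]
    have hmem : ∀ f ∈ fams, ∀ y ∈ G f, pyFamily y = f := by
      intro f _ y hy
      rw [hG, PySem.List.mem_sorted, List.mem_filter] at hy
      exact eq_of_beq hy.2
    have hne : ∀ f ∈ fams, G f ≠ [] := by
      intro f hf
      rw [hG, Ne, PySem.List.sorted_eq_nil_iff, List.filter_eq_nil_iff]
      obtain ⟨i, hi, hif⟩ := List.mem_map.mp ((hmemfams f).mp hf)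
      exact fun h => h i hi (by simp [hif])
    have hout : pyFamily x ∉ fams → G (pyFamily x) = [] := by
      intro hnm
      rw [hG, PySem.List.sorted_eq_nil_iff, List.filter_eq_nil_iff]
      intro i hi hif
      exact hnm ((hmemfams _).mpr (List.mem_map.mpr ⟨i, hi, (eq_of_beq hif).symm ▸ rfl⟩))
    rw [hL, ih, insert_into_blocks x fams G hsort hmem hne hout]
    -- now identify the right-hand side with the blocks of xs ++ [x]
    have hmap : (xs ++ [x]).map pyFamily = xs.map pyFamily ++ [pyFamily x] := by simp
    have hfilter : ∀ f, (xs ++ [x]).filter (fun i => pyFamily i == f)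
        = xs.filter (fun i => pyFamily i == f) ++ (if pyFamily x = f then [x] else []) := by
      intro f
      rw [List.filter_append]
      by_cases h : pyFamily x = f
      · simp [List.filter, h]
      · have hb : (pyFamily x == f) = false := by simp [h]
        simp [List.filter, hb, h]
    have hblock : ∀ f, PySem.List.sorted ((xs ++ [x]).filter (fun i => pyFamily i == f)) colorOrderA
        = if f = pyFamily x then PySem.List.insertBy bCol x (G f) else G f := by
      intro f
      rw [hfilter f]
      have hGf : G f = PySem.List.sorted (xs.filter (fun i => pyFamily i == f)) colorOrderA := rfl
      by_cases h : pyFamily x = f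
      · rw [if_pos h, if_pos h.symm, hGf]
        rw [sorted_foldl_col, sorted_foldl_col, List.foldl_append]
        rfl
      · rw [if_neg h, if_neg (fun hh => h hh.symm), hGf, List.append_nil]
    rw [hmap, ofList_append_singleton]
    by_cases hm : pyFamily x ∈ fams
    · rw [if_pos hm]
      have hadd : PySem.Set.add (PySem.Set.ofList (xs.map pyFamily)) (pyFamily x)
          = PySem.Set.ofList (xs.map pyFamily) :=
        PySem.Set.add_of_mem ((PySem.Set.mem_ofList (α := String) _ _).mpr ((hmemfams _).mp hm))
      rw [hadd, ← hfams]
      exact (List.flatMap_congr (fun f _ => hblock f)).symm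
    · rw [if_neg hm]
      have hadd : PySem.Set.add (PySem.Set.ofList (xs.map pyFamily)) (pyFamily x)
          = PySem.Set.ofList (xs.map pyFamily) ++ [pyFamily x] :=
        PySem.Set.add_of_not_mem (fun hcon => hm ((hmemfams _).mpr ((PySem.Set.mem_ofList (α := String) _ _).mp hcon)))
      rw [hadd]
      rw [sorted_foldl_id, List.foldl_append, ← sorted_foldl_id, ← hfams]
      show _ = (PySem.List.insertBy bFam (pyFamily x) fams).flatMap _
      exact (List.flatMap_congr (fun f _ => hblock f)).symm

lemma groupBy_sorted2 (xs : List String) :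
    pyGroupBy pyFamily (PySem.List.sorted2 xs pyFamily colorOrderA)
      = (PySem.List.sorted (PySem.Set.ofList (xs.map pyFamily)) (fun f => f)).map
          (fun f => PySem.List.sorted (xs.filter (fun i => pyFamily i == f)) colorOrderA) := by
  rw [sorted2_eq_blocks]
  apply pyGroupBy_blocks
  · exact PySem.List.sorted_ofList_pairwise_lt _
  · intro f _ y hy
    rw [PySem.List.mem_sorted, List.mem_filter] at hy
    exact eq_of_beq hy.2
  · intro f hf
    rw [Ne, PySem.List.sorted_eq_nil_iff, List.filter_eq_nil_iff]
    rw [PySem.List.mem_sorted] at hf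
    obtain ⟨i, hi, hif⟩ := List.mem_map.mp ((PySem.Set.mem_ofList (α := String) _ _).mp hf)
    exact fun h => h i hi (by simp [hif])

-- ===== VERDICT (by name: the statement is the Claim_ definition above) =====
theorem build_ordered_ids_spec : Claim_equal_build_ordered_ids := by
  intro existing new_ids _
  unfold Spec_build_ordered_ids build_ordered_ids build_ordered_ids_alt
  have hk1 : (fun n => (pyKey n).1) = pyFamily := funext (fun n => by rw [pyKey_eq])
  have hk2 : (fun n => (pyKey n).2) = colorOrderA := funext (fun n => by rw [pyKey_eq])
  simp only [hk1, hk2]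
  rw [groupBy_sorted2]
  rw [PySem.List.foldl_append_singleton_eq_map, List.nil_append]
  rw [fam_map_keys]
  exact List.map_congr_left (fun f _ => by rw [fam_map_getD])
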